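-- pv_equiv track=rewrite | github.com/keon/algorithms | calculator/math_parser.py | parse
-- ===== SOURCE A (Python) =====
-- def parse(expression):
-- 	"""
-- 	Return array of parsed tokens in the expression
--
-- 	expression String: Math expression to parse in infix notation
-- 	"""
-- 	result = []
-- 	current = ""
-- 	for i in expression:
-- 		if i.isdigit():
-- 			current += i
-- 		else:
-- 			if len(current) > 0:
-- 				result.append(current)
-- 				current = ""
-- 			if i != ' ':
-- 				result.append(i)
-- 	if len(current) > 0:
-- 		result.append(current)
-- 	return result
-- ===== SOURCE B (Python) =====
-- def parse(expression):
--     """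
--     Return array of parsed tokens in the expression
--
--     expression String: Math expression to parse in infix notation
--     """
--     tokens = []
--     i, n = 0, len(expression)
--     while i < n:
--         c = expression[i]
--         if c.isdigit():
--             j = i + 1
--             while j < n and expression[j].isdigit():
--                 j += 1
--             tokens.append(expression[i:j])
--             i = j
--         else:
--             if c != ' ':
--                 tokens.append(c)
--             i += 1
--     return tokens
-- ===== Notes on version B (the rewrite author's own statement) =====
-- stated objective: alternative
-- what changed: Replaces A's character-accumulator with flush-on-boundary logic by a two-pointer scanner that finds each maximal digit run and slices it out of the string directly, so no `current` buffer or end-of-loop flush exists.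
import Mathlib
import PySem

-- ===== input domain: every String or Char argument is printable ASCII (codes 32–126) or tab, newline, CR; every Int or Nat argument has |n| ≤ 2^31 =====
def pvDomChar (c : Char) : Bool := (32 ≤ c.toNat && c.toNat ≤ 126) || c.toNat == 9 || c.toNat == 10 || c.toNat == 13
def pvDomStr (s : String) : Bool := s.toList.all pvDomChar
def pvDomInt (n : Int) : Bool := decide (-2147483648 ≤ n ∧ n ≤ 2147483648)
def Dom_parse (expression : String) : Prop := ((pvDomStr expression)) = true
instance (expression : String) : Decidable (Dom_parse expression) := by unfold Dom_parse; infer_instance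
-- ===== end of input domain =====

-- B replaces A's character-accumulator/flush logic by a two-pointer scan slicing out
-- maximal digit runs; same O(n) cost, different decomposition (objective: alternative).

-- ===== PORT A =====
-- state = (result, current); one step of A's for-loop body
def parseStep (st : List String × List Char) (i : Char) : List String × List Char :=
  if PySem.Chars.isdigit i then
    (st.1, st.2 ++ [i])                       -- current += i
  else
    let st1 := if st.2.length > 0 then (st.1 ++ [String.ofList st.2], ([] : List Char)) else st
    if i ≠ ' ' then (st1.1 ++ [String.ofList [i]], st1.2) else st1

def parse (expression : String) : List String :=
  let st := expression.toList.foldl parseStep ([], [])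
  if st.2.length > 0 then st.1 ++ [String.ofList st.2] else st.1

-- ===== PORT B =====
-- outer while: recursion on the remaining characters; inner while (j past the digit run)
-- = takeWhile/dropWhile; the slice expression[i:j] is the digit run itself
def parseAltGo : List Char → List String
  | [] => []
  | c :: rest =>
    if PySem.Chars.isdigit c then
      String.ofList (c :: rest.takeWhile PySem.Chars.isdigit) ::
        parseAltGo (rest.dropWhile PySem.Chars.isdigit)
    else if c = ' ' then parseAltGo rest
    else String.ofList [c] :: parseAltGo rest
termination_by l => l.length
decreasing_by
· exact Nat.lt_succ_of_le (List.length_dropWhile_le _ _)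
· exact Nat.lt_succ_self _
· exact Nat.lt_succ_self _

def parse_alt (expression : String) : List String := parseAltGo expression.toList

-- ===== PRECONDITION & SPEC =====
def Spec_parse (expression : String) (out : List String) : Prop := out = parse_alt expression
instance (expression : String) (out : List String) : Decidable (Spec_parse expression out) := by unfold Spec_parse; infer_instance

-- ===== CLAIM (what is proved, stated in full; the proofs are below) =====
def Claim_equal_parse : Prop := ∀ (expression : String), Dom_parse expression → Spec_parse expression (parse expression)

-- ===== LEMMAS AND PROOFS =====

lemma tw_dw (p : Char → Bool) : ∀ (ds : List Char) (c : Char) (t : List Char),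
    (∀ x ∈ ds, p x = true) → p c = false →
    (ds ++ c :: t).takeWhile p = ds ∧ (ds ++ c :: t).dropWhile p = c :: t := by
  intro ds c t hds hc
  induction ds with
  | nil => simp [List.dropWhile, hc]
  | cons d ds ih =>
    have hd : p d = true := hds d (by simp)
    have := ih (fun x hx => hds x (by simp [hx]))
    simp [hd, this.1, this.2]

lemma tw_dw_all (p : Char → Bool) : ∀ (ds : List Char),
    (∀ x ∈ ds, p x = true) → ds.takeWhile p = ds ∧ ds.dropWhile p = [] := by
  intro ds hds
  induction ds with
  | nil => simp
  | cons d ds ih =>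
    have hd : p d = true := hds d (by simp)
    have := ih (fun x hx => hds x (by simp [hx]))
    simp [hd, this.1, this.2]

-- B on a digit run followed by a non-digit: flush the run, emit the char unless a space
lemma altGo_flush (ds : List Char) (c : Char) (t : List Char)
    (hds : ∀ x ∈ ds, PySem.Chars.isdigit x = true)
    (hc : PySem.Chars.isdigit c = false) :
    parseAltGo (ds ++ c :: t)
      = (if ds.length > 0 then [String.ofList ds] else [])
        ++ (if c ≠ ' ' then [String.ofList [c]] else []) ++ parseAltGo t := by
  cases ds with
  | nil => simp [parseAltGo, hc]; split <;> simp
  | cons d ds' =>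
    have hd : PySem.Chars.isdigit d = true := hds d (by simp)
    have h := tw_dw PySem.Chars.isdigit ds' c t (fun x hx => hds x (by simp [hx])) hc
    rw [List.cons_append, parseAltGo]
    simp [hd, h.1, h.2, parseAltGo, hc]
    split <;> simp

lemma key : ∀ (cs : List Char) (res : List String) (cur : List Char),
    (∀ x ∈ cur, PySem.Chars.isdigit x = true) →
    (let st := cs.foldl parseStep (res, cur);
     if st.2.length > 0 then st.1 ++ [String.ofList st.2] else st.1)
      = res ++ parseAltGo (cur ++ cs) := by
  intro cs
  induction cs with
  | nil =>
    intro res cur hcur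
    cases cur with
    | nil => simp [parseAltGo]
    | cons d ds =>
      have hd : PySem.Chars.isdigit d = true := hcur d (by simp)
      have h := tw_dw_all PySem.Chars.isdigit ds (fun x hx => hcur x (by simp [hx]))
      simp [parseAltGo, hd, h.1, h.2]
  | cons c cs ih =>
    intro res cur hcur
    by_cases hc : PySem.Chars.isdigit c = true
    · have : (cur ++ [c]) ++ cs = cur ++ c :: cs := by simp
      rw [← this]
      have := ih res (cur ++ [c]) (by
        intro x hx; rcases List.mem_append.1 hx with h | h
        · exact hcur x h
        · simp at h; subst h; exact hc)
      simpa [parseStep, hc] using this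
    · have hc' : PySem.Chars.isdigit c = false := by simpa using hc
      rw [altGo_flush cur c cs hcur hc']
      by_cases hsp : c = ' '
      · subst hsp
        cases cur with
        | nil =>
          have := ih res [] (by simp)
          simpa [parseStep, hc'] using this
        | cons d ds =>
          have := ih (res ++ [String.ofList (d :: ds)]) [] (by simp)
          simpa [parseStep, hc'] using this
      · cases cur with
        | nil =>
          have := ih (res ++ [String.ofList [c]]) [] (by simp)
          simpa [parseStep, hc', hsp] using this
        | cons d ds =>
          have := ih (res ++ [String.ofList (d :: ds)] ++ [String.ofList [c]]) [] (by simp)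
          simpa [parseStep, hc', hsp] using this

-- ===== VERDICT (by name: the statement is the Claim_ definition above) =====
theorem parse_spec : Claim_equal_parse := by
  intro e _
  show parse e = parse_alt e
  have := key e.toList [] [] (by simp)
  simpa [parse, parse_alt] using this
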